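-- pv_equiv track=rewrite | github.com/OptimalSearchSpacePruning/OptimalSearchSpacePruning_AnalysesCode | utils.py | get_neighboring_squares
-- ===== SOURCE A (Python) =====
-- def get_neighboring_squares(size, square, neighborhood_size):
--     neighbors = []
--     row = square[0]
--     col = square[1]
--     for i in range(-1*neighborhood_size,neighborhood_size+1):
--         for j in range(-1*neighborhood_size,neighborhood_size+1):
--             if (i != 0) | (j != 0):
--                 r = row + i
--                 c = col + j
--                 if (r < size) & (r >= 0) & (c < size) & (c >= 0):
--                     neighbors.append([r,c])
--     return neighbors
-- ===== SOURCE B (Python) =====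
-- def get_neighboring_squares(size, square, neighborhood_size):
--     # Build the answer as a concatenation of rectangular blocks:
--     # full rows above the center, the center row split around the center cell,
--     # and full rows below -- no per-cell test anywhere.
--     row, col = square
--     r_lo = max(0, row - neighborhood_size)
--     r_hi = min(size - 1, row + neighborhood_size)
--     c_lo = max(0, col - neighborhood_size)
--     c_hi = min(size - 1, col + neighborhood_size)
--     above = [[r, c] for r in range(r_lo, min(r_hi, row - 1) + 1)
--                     for c in range(c_lo, c_hi + 1)]
--     if r_lo <= row <= r_hi:
--         middle = ([[row, c] for c in range(c_lo, min(c_hi, col - 1) + 1)]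
--                 + [[row, c] for c in range(max(c_lo, col + 1), c_hi + 1)])
--     else:
--         middle = []
--     below = [[r, c] for r in range(max(r_lo, row + 1), r_hi + 1)
--                     for c in range(c_lo, c_hi + 1)]
--     return above + middle + below
-- ===== Notes on version B (the rewrite author's own statement) =====
-- stated objective: alternative
-- what changed: B never tests individual cells: it computes the clamped row/col bounds and builds the result as a concatenation of rectangular blocks (full rows above the center, the center row split into a left and a right strip around the center cell, full rows below), whereas A sweeps the whole (2k+1)^2 window with a per-cell bounds-and-center test.
import Mathlib
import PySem

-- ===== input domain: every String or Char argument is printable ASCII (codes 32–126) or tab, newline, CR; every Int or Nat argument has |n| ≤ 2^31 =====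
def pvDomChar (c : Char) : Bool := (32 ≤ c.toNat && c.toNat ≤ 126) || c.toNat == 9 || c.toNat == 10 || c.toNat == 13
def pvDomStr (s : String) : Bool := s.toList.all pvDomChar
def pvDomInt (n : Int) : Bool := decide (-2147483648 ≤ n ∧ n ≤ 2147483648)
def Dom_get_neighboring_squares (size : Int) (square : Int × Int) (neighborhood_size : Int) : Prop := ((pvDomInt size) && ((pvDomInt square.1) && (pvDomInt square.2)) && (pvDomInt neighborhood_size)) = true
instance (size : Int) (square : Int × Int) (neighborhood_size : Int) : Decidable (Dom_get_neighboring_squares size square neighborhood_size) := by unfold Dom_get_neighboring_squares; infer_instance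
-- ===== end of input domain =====

-- B builds the answer as a concatenation of rectangular blocks (rows above the center, the
-- center row split around the center cell, rows below) with no per-cell test (objective: alternative).

-- ===== PORT A =====
def get_neighboring_squares (size : Int) (square : Int × Int) (neighborhood_size : Int) : List (List Int) :=
  let row := square.1
  let col := square.2
  (PySem.List.pyRange (-1 * neighborhood_size) (neighborhood_size + 1) 1).foldl (fun neighbors i =>
    (PySem.List.pyRange (-1 * neighborhood_size) (neighborhood_size + 1) 1).foldl (fun neighbors j =>
      if i ≠ 0 ∨ j ≠ 0 then
        let r := row + i
        let c := col + j
        if r < size ∧ r ≥ 0 ∧ c < size ∧ c ≥ 0 then neighbors ++ [[r, c]] else neighbors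
      else neighbors) neighbors) []

-- ===== PORT B =====
def get_neighboring_squares_alt (size : Int) (square : Int × Int) (neighborhood_size : Int) : List (List Int) :=
  let row := square.1
  let col := square.2
  let r_lo := max 0 (row - neighborhood_size)
  let r_hi := min (size - 1) (row + neighborhood_size)
  let c_lo := max 0 (col - neighborhood_size)
  let c_hi := min (size - 1) (col + neighborhood_size)
  let above := (PySem.List.pyRange r_lo (min r_hi (row - 1) + 1) 1).flatMap (fun r =>
    (PySem.List.pyRange c_lo (c_hi + 1) 1).map (fun c => [r, c]))
  let middle := if r_lo ≤ row ∧ row ≤ r_hi then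
      ((PySem.List.pyRange c_lo (min c_hi (col - 1) + 1) 1).map (fun c => [row, c]))
      ++ ((PySem.List.pyRange (max c_lo (col + 1)) (c_hi + 1) 1).map (fun c => [row, c]))
    else []
  let below := (PySem.List.pyRange (max r_lo (row + 1)) (r_hi + 1) 1).flatMap (fun r =>
    (PySem.List.pyRange c_lo (c_hi + 1) 1).map (fun c => [r, c]))
  above ++ (middle ++ below)

-- ===== PRECONDITION & SPEC =====
def Spec_get_neighboring_squares (size : Int) (square : Int × Int) (neighborhood_size : Int) (out : List (List Int)) : Prop := out = get_neighboring_squares_alt size square neighborhood_size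
instance (size : Int) (square : Int × Int) (neighborhood_size : Int) (out : List (List Int)) : Decidable (Spec_get_neighboring_squares size square neighborhood_size out) := by unfold Spec_get_neighboring_squares; infer_instance

-- ===== CLAIM (what is proved, stated in full; the proofs are below) =====
def Claim_equal_get_neighboring_squares : Prop := ∀ (size : Int) (square : Int × Int) (neighborhood_size : Int), Dom_get_neighboring_squares size square neighborhood_size → Spec_get_neighboring_squares size square neighborhood_size (get_neighboring_squares size square neighborhood_size)

-- ===== LEMMAS AND PROOFS =====

-- filtering a step-1 range by an interval clamps its endpoints
lemma filter_pyRange_interval (lo hi : Int) : ∀ (n : ℕ) (a b : Int), (b - a).toNat = n →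
    (PySem.List.pyRange a b 1).filter (fun x => decide (lo ≤ x ∧ x < hi))
      = PySem.List.pyRange (max a lo) (min b hi) 1 := by
  intro n
  induction n with
  | zero =>
    intro a b h
    have hba : b ≤ a := by omega
    rw [PySem.List.pyRange_one_eq_nil hba, PySem.List.pyRange_one_eq_nil (by omega)]
    rfl
  | succ n ih =>
    intro a b h
    have hab : a < b := by omega
    rw [PySem.List.pyRange_one_cons hab, List.filter_cons]
    rw [ih (a+1) b (by omega)]
    by_cases hc : lo ≤ a ∧ a < hi
    · simp only [hc, decide_true, and_self]
      have h1 : max a lo = a := by omega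
      have h2 : max (a+1) lo = a + 1 := by omega
      rw [h1, h2, ← PySem.List.pyRange_one_cons (by omega)]
      simp
    · simp only [hc, decide_false]
      rcases (by omega : a < lo ∨ hi ≤ a) with h' | h'
      · have : max a lo = max (a+1) lo := by omega
        simp [this]
      · rw [PySem.List.pyRange_one_eq_nil (by omega), PySem.List.pyRange_one_eq_nil (by omega)]
        simp

-- filtering a step-1 range by '≠ col' splits it into the part below col and the part above col
lemma filter_pyRange_ne (col : Int) : ∀ (n : ℕ) (u v : Int), (v - u).toNat = n →
    (PySem.List.pyRange u v 1).filter (fun c => decide (¬ c = col))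
      = PySem.List.pyRange u (min v col) 1 ++ PySem.List.pyRange (max u (col+1)) v 1 := by
  intro n
  induction n with
  | zero =>
    intro u v h
    rw [PySem.List.pyRange_one_eq_nil (by omega), PySem.List.pyRange_one_eq_nil (by omega),
      PySem.List.pyRange_one_eq_nil (by omega)]
    rfl
  | succ n ih =>
    intro u v h
    have huv : u < v := by omega
    rw [PySem.List.pyRange_one_cons huv, List.filter_cons, ih (u+1) v (by omega)]
    by_cases hc : u = col
    · subst hc
      simp only [not_true_eq_false]
      rw [PySem.List.pyRange_one_eq_nil (show min v u ≤ u from by omega),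
        PySem.List.pyRange_one_eq_nil (show min v u ≤ u + 1 from by omega),
        show max u (u+1) = max (u+1) (u+1) from by omega]
      simp
    · simp only [hc, not_false_eq_true, decide_true, if_true]
      rcases (by omega : u < col ∨ col < u) with h' | h'
      · rw [show max u (col+1) = max (u+1) (col+1) from by omega,
          PySem.List.pyRange_one_cons (show u < min v col from by omega)]
        simp
      · rw [PySem.List.pyRange_one_eq_nil (show min v col ≤ u from by omega),
          PySem.List.pyRange_one_eq_nil (show min v col ≤ u + 1 from by omega),
          show max u (col+1) = u from by omega,
          show max (u+1) (col+1) = u + 1 from by omega]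
        simp [PySem.List.pyRange_one_cons huv]

-- shifting a step-1 range
lemma map_add_pyRange (d a b : Int) :
    (PySem.List.pyRange a b 1).map (fun x => d + x) = PySem.List.pyRange (d + a) (d + b) 1 := by
  rw [PySem.List.pyRange_one, PySem.List.pyRange_one]
  have h : d + b - (d + a) = b - a := by ring
  rw [h, List.map_map]
  congr 1
  funext k
  simp; ring

-- flatMap ignores elements mapped to []
lemma flatMap_filter_of_nil {α β : Type} (p : α → Bool) (h : α → List β) (l : List α)
    (hnil : ∀ x, p x = false → h x = []) : l.flatMap h = (l.filter p).flatMap h := by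
  induction l with
  | nil => rfl
  | cons x xs ih =>
    rw [List.flatMap_cons, List.filter_cons]
    by_cases hp : p x = true
    · simp [hp, ih]
    · simp only [Bool.not_eq_true] at hp
      simp [hp, hnil x hp, ih]

lemma flatMap_congr_mem {α β : Type} {f g : α → List β} {l : List α}
    (h : ∀ x ∈ l, f x = g x) : l.flatMap f = l.flatMap g := by
  induction l with
  | nil => rfl
  | cons x xs ih =>
    rw [List.flatMap_cons, List.flatMap_cons, h x (by simp), ih (fun y hy => h y (by simp [hy]))]

-- for a non-center row the center-exclusion filter keeps everything
lemma filter_triv (row col r : Int) (h : r ≠ row) (l : List Int) :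
    l.filter (fun c => decide (¬ (r = row ∧ c = col))) = l := by
  apply List.filter_eq_self.mpr
  intro c _
  simp only [decide_eq_true_eq]
  tauto

-- A's clamped, filtered sweep in flatMap form (rows [a,b), cols [u,v)) equals B's three blocks
lemma blocks (row col a b u v : Int) :
    (PySem.List.pyRange a b 1).flatMap (fun r =>
      ((PySem.List.pyRange u v 1).filter (fun c => decide (¬ (r = row ∧ c = col)))).map (fun c => [r, c]))
  = ((PySem.List.pyRange a (min b row) 1).flatMap (fun r =>
      (PySem.List.pyRange u v 1).map (fun c => [r, c])))
    ++ (((if a ≤ row ∧ row < b then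
          ((PySem.List.pyRange u (min v col) 1).map (fun c => [row, c]))
          ++ ((PySem.List.pyRange (max u (col+1)) v 1).map (fun c => [row, c]))
        else []))
    ++ ((PySem.List.pyRange (max a (row+1)) b 1).flatMap (fun r =>
      (PySem.List.pyRange u v 1).map (fun c => [r, c])))) := by
  by_cases h : a ≤ row ∧ row < b
  · rw [if_pos h,
      PySem.List.pyRange_one_append a row b h.1 (by omega),
      PySem.List.pyRange_one_append row (row+1) b (by omega) (by omega),
      PySem.List.pyRange_one_singleton,
      List.flatMap_append, List.flatMap_append, List.flatMap_singleton]
    congr 1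
    · rw [show min b row = row from by omega]
      apply flatMap_congr_mem
      intro r hr
      rw [PySem.List.mem_pyRange_one] at hr
      rw [filter_triv row col r (by omega)]
    · congr 1
      · rw [show (fun c => decide (¬ (row = row ∧ c = col))) = (fun c => decide (¬ c = col))
          from funext fun c => decide_eq_decide.mpr (by tauto)]
        rw [filter_pyRange_ne col _ u v rfl, List.map_append]
      · rw [show max a (row+1) = row + 1 from by omega]
        apply flatMap_congr_mem
        intro r hr
        rw [PySem.List.mem_pyRange_one] at hr
        rw [filter_triv row col r (by omega)]
  · rw [if_neg h, List.nil_append]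
    rcases (by omega : row < a ∨ b ≤ row) with h' | h'
    · rw [PySem.List.pyRange_one_eq_nil (show min b row ≤ a from by omega),
        List.flatMap_nil, List.nil_append,
        show max a (row+1) = a from by omega]
      apply flatMap_congr_mem
      intro r hr
      rw [PySem.List.mem_pyRange_one] at hr
      rw [filter_triv row col r (by omega)]
    · rw [show min b row = b from by omega,
        PySem.List.pyRange_one_eq_nil (show b ≤ max a (row+1) from by omega),
        List.flatMap_nil, List.append_nil]
      apply flatMap_congr_mem
      intro r hr
      rw [PySem.List.mem_pyRange_one] at hr
      rw [filter_triv row col r (by omega)]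

-- the heart: A's filtered full square in flatMap form equals the clamped, filtered flatMap form
lemma core (size row col n : Int) :
    (PySem.List.pyRange (-1*n) (n+1) 1).flatMap (fun i =>
      ((PySem.List.pyRange (-1*n) (n+1) 1).filter (fun j =>
        decide ((i ≠ 0 ∨ j ≠ 0) ∧ (row + i < size ∧ row + i ≥ 0 ∧ col + j < size ∧ col + j ≥ 0)))).map
        (fun j => [row + i, col + j]))
  = (PySem.List.pyRange (max 0 (row-n)) (min (size-1) (row+n) + 1) 1).flatMap (fun r =>
      ((PySem.List.pyRange (max 0 (col-n)) (min (size-1) (col+n) + 1) 1).filter (fun c =>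
        decide (¬(r = row ∧ c = col)))).map (fun c => [r, c])) := by
  have hC : ∀ r : Int,
      ((PySem.List.pyRange (col + -1*n) (col + (n+1)) 1).filter (fun c =>
        decide ((¬(r = row ∧ c = col)) ∧ 0 ≤ r ∧ r < size ∧ 0 ≤ c ∧ c < size))).map (fun c => [r, c])
    = ((PySem.List.pyRange (-1*n) (n+1) 1).filter (fun j =>
        decide ((r - row ≠ 0 ∨ j ≠ 0) ∧ (r < size ∧ r ≥ 0 ∧ col + j < size ∧ col + j ≥ 0)))).map
        (fun j => [r, col + j]) := by
    intro r
    rw [← map_add_pyRange col (-1*n) (n+1), List.filter_map, List.map_map]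
    congr 1
    apply List.filter_congr
    intro j _
    simp only [Function.comp]
    exact decide_eq_decide.mpr (by constructor <;> intro h <;> omega)
  have h1 : (PySem.List.pyRange (-1*n) (n+1) 1).flatMap (fun i =>
      ((PySem.List.pyRange (-1*n) (n+1) 1).filter (fun j =>
        decide ((i ≠ 0 ∨ j ≠ 0) ∧ (row + i < size ∧ row + i ≥ 0 ∧ col + j < size ∧ col + j ≥ 0)))).map
        (fun j => [row + i, col + j]))
    = (PySem.List.pyRange (row + -1*n) (row + (n+1)) 1).flatMap (fun r =>
      ((PySem.List.pyRange (col + -1*n) (col + (n+1)) 1).filter (fun c =>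
        decide ((¬(r = row ∧ c = col)) ∧ 0 ≤ r ∧ r < size ∧ 0 ≤ c ∧ c < size))).map (fun c => [r, c])) := by
    rw [← map_add_pyRange row (-1*n) (n+1), List.flatMap_map]
    apply flatMap_congr_mem
    intro i _
    rw [hC (row + i)]
    congr 1
    apply List.filter_congr
    intro j _
    exact decide_eq_decide.mpr (by constructor <;> intro h <;> omega)
  rw [h1]
  have h2 : (PySem.List.pyRange (row + -1*n) (row + (n+1)) 1).flatMap (fun r =>
      ((PySem.List.pyRange (col + -1*n) (col + (n+1)) 1).filter (fun c =>
        decide ((¬(r = row ∧ c = col)) ∧ 0 ≤ r ∧ r < size ∧ 0 ≤ c ∧ c < size))).map (fun c => [r, c]))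
    = ((PySem.List.pyRange (row + -1*n) (row + (n+1)) 1).filter (fun r => decide (0 ≤ r ∧ r < size))).flatMap (fun r =>
      ((PySem.List.pyRange (col + -1*n) (col + (n+1)) 1).filter (fun c =>
        decide ((¬(r = row ∧ c = col)) ∧ 0 ≤ r ∧ r < size ∧ 0 ≤ c ∧ c < size))).map (fun c => [r, c])) := by
    apply flatMap_filter_of_nil
    intro r hr
    simp only [decide_eq_false_iff_not] at hr
    rw [List.filter_eq_nil_iff.mpr, List.map_nil]
    intro c _
    simp only [decide_eq_true_eq]
    tauto
  rw [h2, filter_pyRange_interval 0 size _ (row + -1*n) (row + (n+1)) rfl]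
  have e1 : max (row + -1*n) 0 = max 0 (row - n) := by omega
  have e2 : min (row + (n+1)) size = min (size-1) (row+n) + 1 := by omega
  rw [e1, e2]
  apply flatMap_congr_mem
  intro r hr
  rw [PySem.List.mem_pyRange_one] at hr
  have hr0 : 0 ≤ r := by omega
  have hrs : r < size := by omega
  have hp : (fun c => decide ((¬(r = row ∧ c = col)) ∧ 0 ≤ r ∧ r < size ∧ 0 ≤ c ∧ c < size))
      = (fun c => decide (¬(r = row ∧ c = col)) && decide (0 ≤ c ∧ c < size)) := by
    funext c
    rw [← Bool.decide_and]
    exact decide_eq_decide.mpr (by tauto)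
  rw [hp, ← List.filter_filter, filter_pyRange_interval 0 size _ (col + -1*n) (col + (n+1)) rfl]
  have e3 : max (col + -1*n) 0 = max 0 (col - n) := by omega
  have e4 : min (col + (n+1)) size = min (size-1) (col+n) + 1 := by omega
  rw [e3, e4]

lemma ports_eq (size : Int) (square : Int × Int) (n : Int) :
    get_neighboring_squares size square n = get_neighboring_squares_alt size square n := by
  obtain ⟨row, col⟩ := square
  show (PySem.List.pyRange (-1 * n) (n + 1) 1).foldl (fun neighbors i =>
    (PySem.List.pyRange (-1 * n) (n + 1) 1).foldl (fun neighbors j =>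
      if i ≠ 0 ∨ j ≠ 0 then
        if row + i < size ∧ row + i ≥ 0 ∧ col + j < size ∧ col + j ≥ 0 then neighbors ++ [[row + i, col + j]] else neighbors
      else neighbors) neighbors) []
    = ((PySem.List.pyRange (max 0 (row - n)) (min (min (size-1) (row+n)) (row - 1) + 1) 1).flatMap (fun r =>
        (PySem.List.pyRange (max 0 (col - n)) (min (size-1) (col+n) + 1) 1).map (fun c => [r, c])))
      ++ (((if max 0 (row - n) ≤ row ∧ row ≤ min (size-1) (row+n) then
            ((PySem.List.pyRange (max 0 (col - n)) (min (min (size-1) (col+n)) (col - 1) + 1) 1).map (fun c => [row, c]))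
            ++ ((PySem.List.pyRange (max (max 0 (col - n)) (col + 1)) (min (size-1) (col+n) + 1) 1).map (fun c => [row, c]))
          else []))
      ++ ((PySem.List.pyRange (max (max 0 (row - n)) (row + 1)) (min (size-1) (row+n) + 1) 1).flatMap (fun r =>
        (PySem.List.pyRange (max 0 (col - n)) (min (size-1) (col+n) + 1) 1).map (fun c => [r, c]))))
  have hA : ∀ (acc : List (List Int)) (i : Int),
      (PySem.List.pyRange (-1 * n) (n + 1) 1).foldl (fun neighbors j =>
        if i ≠ 0 ∨ j ≠ 0 then
          if row + i < size ∧ row + i ≥ 0 ∧ col + j < size ∧ col + j ≥ 0 then neighbors ++ [[row + i, col + j]] else neighbors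
        else neighbors) acc
    = acc ++ ((PySem.List.pyRange (-1 * n) (n + 1) 1).filter (fun j =>
        decide ((i ≠ 0 ∨ j ≠ 0) ∧ (row + i < size ∧ row + i ≥ 0 ∧ col + j < size ∧ col + j ≥ 0)))).map
        (fun j => [row + i, col + j]) := by
    intro acc i
    rw [show (fun (neighbors : List (List Int)) (j : Int) =>
        if i ≠ 0 ∨ j ≠ 0 then
          if row + i < size ∧ row + i ≥ 0 ∧ col + j < size ∧ col + j ≥ 0 then neighbors ++ [[row + i, col + j]] else neighbors
        else neighbors)
      = (fun neighbors j =>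
        if (i ≠ 0 ∨ j ≠ 0) ∧ (row + i < size ∧ row + i ≥ 0 ∧ col + j < size ∧ col + j ≥ 0) then neighbors ++ [[row + i, col + j]] else neighbors)
      from by funext acc j; split_ifs <;> tauto]
    exact PySem.List.foldl_append_ite _ _ _ _
  calc _ = ((PySem.List.pyRange (-1*n) (n+1) 1).flatMap (fun i =>
          ((PySem.List.pyRange (-1*n) (n+1) 1).filter (fun j =>
            decide ((i ≠ 0 ∨ j ≠ 0) ∧ (row + i < size ∧ row + i ≥ 0 ∧ col + j < size ∧ col + j ≥ 0)))).map
            (fun j => [row + i, col + j]))) := by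
        rw [funext fun acc => funext fun i => hA acc i, PySem.List.foldl_append_eq_flatMap, List.nil_append]
    _ = ((PySem.List.pyRange (max 0 (row-n)) (min (size-1) (row+n) + 1) 1).flatMap (fun r =>
          ((PySem.List.pyRange (max 0 (col-n)) (min (size-1) (col+n) + 1) 1).filter (fun c =>
            decide (¬(r = row ∧ c = col)))).map (fun c => [r, c]))) := core size row col n
    _ = _ := by
        rw [blocks row col (max 0 (row-n)) (min (size-1) (row+n) + 1) (max 0 (col-n)) (min (size-1) (col+n) + 1)]
        rw [show min (min (size-1) (row+n) + 1) row = min (min (size-1) (row+n)) (row - 1) + 1 from by omega,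
          show min (min (size-1) (col+n) + 1) col = min (min (size-1) (col+n)) (col - 1) + 1 from by omega]
        by_cases hm : max 0 (row - n) ≤ row ∧ row ≤ min (size-1) (row+n)
        · rw [if_pos (show max 0 (row-n) ≤ row ∧ row < min (size-1) (row+n) + 1 from ⟨hm.1, by omega⟩), if_pos hm]
        · rw [if_neg (show ¬(max 0 (row-n) ≤ row ∧ row < min (size-1) (row+n) + 1) from fun hh => hm ⟨hh.1, by omega⟩), if_neg hm]

-- ===== VERDICT (by name: the statement is the Claim_ definition above) =====
theorem get_neighboring_squares_spec : Claim_equal_get_neighboring_squares := by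
  intro size square neighborhood_size _
  unfold Spec_get_neighboring_squares
  exact ports_eq size square neighborhood_size
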